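-- pv_equiv track=rewrite | github.com/JesterArc/WordleClone | Wordle/src/Logic/WordProvider.py | mark_repetitions
-- ===== SOURCE A (Python) =====
-- def mark_repetitions(word) -> list:
--     """Marks each repeating letter in word with a number of times it appeared before
--
--     Args:
--         word (str): a string of letters
--
--     Returns:
--         list : list of letters
--     """
--     letters = list(word)
--     count_repetitions = dict()
--     for pos, letter in enumerate(letters):
--         if letter == "-":
--             pass
--         letters[pos] = f"{letter}{count_repetitions.get(letter, '')}"
--         if letter not in count_repetitions:
--             count_repetitions[letter] = 1
--         else:
--             count_repetitions[letter] += 1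
--     return letters
-- ===== SOURCE B (Python) =====
-- def mark_repetitions(word) -> list:
--     """Marks each repeating letter in word with a number of times it appeared before.
--
--     Builds an inverted index letter -> list of positions, then scatters the
--     rank-suffixed labels into a preallocated output list.
--     """
--     letters = list(word)
--     index = {}
--     for pos, letter in enumerate(letters):
--         index.setdefault(letter, []).append(pos)
--     out = [""] * len(letters)
--     for letter, positions in index.items():
--         for rank, pos in enumerate(positions):
--             out[pos] = f"{letter}{'' if rank == 0 else rank}"
--     return out
-- ===== Notes on version B (the rewrite author's own statement) =====
-- stated objective: alternative
-- what changed: A's single online pass with a running-count dict is replaced by a two-phase scatter: first build an inverted index letter -> list of its positions, then for each letter write its rank-suffixed labels out of order into a preallocated output list.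
import Mathlib
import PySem

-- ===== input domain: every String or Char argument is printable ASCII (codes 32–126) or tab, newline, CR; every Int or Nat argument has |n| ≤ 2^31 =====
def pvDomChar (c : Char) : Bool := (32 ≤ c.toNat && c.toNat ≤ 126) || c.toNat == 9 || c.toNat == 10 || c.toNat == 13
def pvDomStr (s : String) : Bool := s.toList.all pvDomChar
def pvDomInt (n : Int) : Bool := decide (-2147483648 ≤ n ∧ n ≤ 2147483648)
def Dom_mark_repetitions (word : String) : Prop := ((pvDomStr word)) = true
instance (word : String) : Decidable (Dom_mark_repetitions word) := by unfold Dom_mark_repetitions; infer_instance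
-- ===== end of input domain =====

-- B replaces A's single online pass (running-count dict, output emitted left to right) by a
-- two-phase scatter: build an inverted index letter -> list of positions, then write each
-- letter's rank-suffixed labels into a preallocated output list; objective: alternative.

-- ===== PORT A =====
-- A's single pass: list of 1-char strings, a running dict of counts, in-place set at pos.
def mark_repetitions (word : String) : List String :=
  let letters0 : List String := word.toList.map (fun c => String.ofList [c])
  ((PySem.List.enumerate letters0 0).foldl
    (fun (st : List String × PySem.Dict String Int) pl =>
      let pos := pl.1
      let letter := pl.2
      -- 'if letter == "-": pass' in A is a no-op; ported as nothing
      let suffix : String :=            -- f"{letter}{count_repetitions.get(letter, '')}"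
        match st.2.get? letter with
        | none => ""
        | some n => PySem.Int.toStr n
      let letters := st.1.set pos.toNat (letter ++ suffix)   -- pos from enumerate is ≥ 0
      let d := if st.2.contains letter = false
               then st.2.insert letter 1
               else st.2.modify letter 0 (· + 1)
      (letters, d))
    (letters0, PySem.Dict.empty)).1

-- ===== PORT B =====
-- B phase 1: inverted index letter -> list of positions (index.setdefault(letter, []).append(pos),
-- i.e. index[letter] = index.get(letter, []) + [pos], is Dict.modify with default []).
-- B phase 2: out = [""] * n, then out[pos] = letter + ('' if rank == 0 else str(rank)) for each
-- (rank, pos) in enumerate(positions) of each dict item.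
def mark_repetitions_alt (word : String) : List String :=
  let letters : List String := word.toList.map (fun c => String.ofList [c])
  let index : PySem.Dict String (List Int) :=
    (PySem.List.enumerate letters 0).foldl
      (fun d pl => d.modify pl.2 [] (· ++ [pl.1])) PySem.Dict.empty
  let out0 : List String := List.replicate letters.length ""
  index.items.foldl
    (fun out kv =>
      (PySem.List.enumerate kv.2 0).foldl
        (fun out rp =>
          PySem.List.pySetD out rp.2
            (kv.1 ++ (if rp.1 = 0 then "" else PySem.Int.toStr rp.1)))
        out)
    out0

-- ===== PRECONDITION & SPEC =====
def Spec_mark_repetitions (word : String) (out : List String) : Prop := out = mark_repetitions_alt word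
instance (word : String) (out : List String) : Decidable (Spec_mark_repetitions word out) := by unfold Spec_mark_repetitions; infer_instance

-- ===== CLAIM (what is proved, stated in full; the proofs are below) =====
def Claim_equal_mark_repetitions : Prop := ∀ (word : String), Dom_mark_repetitions word → Spec_mark_repetitions word (mark_repetitions word)

-- ===== LEMMAS AND PROOFS =====

-- the suffix Python's f-string appends: '' for 0, str(k) otherwise
def pvSfx (k : Int) : String := if k = 0 then "" else PySem.Int.toStr k

-- common reference: the tail of the output for remainder r after prefix p has been seen
def pvSuffixOut (p r : List Char) : List String :=
  match r with
  | [] => []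
  | c :: r' =>
      (String.ofList [c] ++ pvSfx ((p.count c : Int))) :: pvSuffixOut (p ++ [c]) r'

theorem pvSingle_inj {a b : Char} (h : String.ofList [a] = String.ofList [b]) : a = b := by
  have := congrArg String.toList h
  simp at this
  exact this

theorem pvSetAppend {α : Type} (done : List α) (x v : α) (t : List α) :
    (done ++ x :: t).set done.length v = done ++ v :: t := by
  induction done with
  | nil => rfl
  | cons y ys ih => simp [ih]

theorem pvSuffixOut_length (r : List Char) : ∀ p, (pvSuffixOut p r).length = r.length := by
  induction r with
  | nil => intro p; rfl
  | cons c r' ih => intro p; simp [pvSuffixOut, ih]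

-- pointwise value of the reference output
theorem pvSuffixOut_getElem? (r : List Char) : ∀ (p : List Char) (j : Nat) (c : Char),
    r[j]? = some c →
    (pvSuffixOut p r)[j]? = some (String.ofList [c] ++ pvSfx (((p ++ r.take j).count c : Int))) := by
  induction r with
  | nil => intro p j c h; simp at h
  | cons x r' ih =>
      intro p j c h
      cases j with
      | zero =>
          rw [List.getElem?_cons_zero] at h
          injection h with h
          subst h
          rw [show pvSuffixOut p (x :: r') = (String.ofList [x] ++ pvSfx ((p.count x : Int)))
            :: pvSuffixOut (p ++ [x]) r' from rfl]
          simp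
      | succ j' =>
          simp only [List.getElem?_cons_succ] at h
          have := ih (p ++ [x]) j' c h
          rw [show pvSuffixOut p (x :: r') = (String.ofList [x] ++ pvSfx ((p.count x : Int)))
            :: pvSuffixOut (p ++ [x]) r' from rfl]
          simp only [List.getElem?_cons_succ, List.take_succ_cons, List.append_assoc,
            List.singleton_append] at this ⊢
          exact this

-- the positions (as Python ints) of letter c in l, offset by base b
def pvOccs (c : Char) : List Char → Nat → List Int
  | [], _ => []
  | x :: t, b => if x = c then ((b : Int)) :: pvOccs c t (b + 1) else pvOccs c t (b + 1)

theorem pvOccs_nil (c : Char) (b : Nat) : pvOccs c [] b = [] := rfl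

theorem pvOccs_cons (c x : Char) (t : List Char) (b : Nat) :
    pvOccs c (x :: t) b = if x = c then ((b : Int)) :: pvOccs c t (b + 1)
      else pvOccs c t (b + 1) := rfl

-- phase 1 value: what the grouping loop stores under key c
theorem pvFilt (c : Char) (l : List Char) : ∀ (b : Nat),
    (((PySem.List.enumerate (l.map (fun c => String.ofList [c])) (b : Int)).map Prod.swap).filter
       (fun p => p.1 == String.ofList [c])).map (fun x => x.2) = pvOccs c l b := by
  induction l with
  | nil => intro b; rw [pvOccs_nil]; simp [PySem.List.enumerate_nil]
  | cons x t ih =>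
      intro b
      have hb : ((b : Int) + 1) = ((b + 1 : Nat) : Int) := by push_cast; ring
      rw [List.map_cons, PySem.List.enumerate_cons, pvOccs_cons, hb, List.map_cons,
        Prod.swap_prod_mk, List.filter_cons]
      by_cases hx : x = c
      · subst hx
        rw [if_pos (by simp), if_pos rfl, List.map_cons]
        exact congrArg _ (ih (b + 1))
      · have hne : String.ofList [x] ≠ String.ofList [c] := fun h => hx (pvSingle_inj h)
        rw [if_neg (by simp [hne]), if_neg hx]
        exact ih (b + 1)

-- one scatter pass of phase 2 (named so the proofs can talk about it; = the port's inner fold)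
def pvWrite (s : String) (q : List Int) (k0 : Int) (out : List String) : List String :=
  (PySem.List.enumerate q k0).foldl
    (fun out rp => PySem.List.pySetD out rp.2 (s ++ pvSfx rp.1)) out

theorem pvWrite_cons (s : String) (r : Int) (q : List Int) (k0 : Int) (out : List String) :
    pvWrite s (r :: q) k0 out = pvWrite s q (k0 + 1) (PySem.List.pySetD out r (s ++ pvSfx k0)) := by
  simp [pvWrite, PySem.List.enumerate_cons]

theorem pvWrite_length (s : String) (q : List Int) : ∀ (k0 : Int) (out : List String),
    (pvWrite s q k0 out).length = out.length := by
  induction q with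
  | nil => intro k0 out; rfl
  | cons r q' ih =>
      intro k0 out
      rw [pvWrite_cons, ih, PySem.List.length_pySetD]

-- pointwise effect of scattering letter c's positions: positions of c get their rank suffix,
-- everything else is untouched
theorem pvInner_get (c : Char) (l : List Char) : ∀ (b k0 : Nat) (out : List String) (j : Nat),
    (pvWrite (String.ofList [c]) (pvOccs c l b) (k0 : Int) out)[j]? =
      if b ≤ j ∧ l[j - b]? = some c
      then (if j < out.length
            then some (String.ofList [c] ++ pvSfx ((k0 : Int) + ((l.take (j - b)).count c : Int)))
            else none)
      else out[j]? := by
  induction l with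
  | nil =>
      intro b k0 out j
      rw [pvOccs_nil]
      simp [pvWrite, PySem.List.enumerate_nil]
  | cons x t ih =>
      intro b k0 out j
      rw [pvOccs_cons]
      by_cases hx : x = c
      · subst hx
        rw [if_pos rfl, pvWrite_cons,
          PySem.List.pySetD_natCast out b (String.ofList [x] ++ pvSfx (k0 : Int)),
          show ((k0 : Int) + 1) = ((k0 + 1 : Nat) : Int) by push_cast; ring,
          ih (b + 1) (k0 + 1) _ j]
        simp only [List.length_set]
        rcases lt_trichotomy j b with hj | hj | hj
        · -- j < b: untouched on both sides
          rw [if_neg (show ¬(b + 1 ≤ j ∧ t[j - (b + 1)]? = some x) from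
                fun hcc => absurd hcc.1 (by omega)),
            if_neg (show ¬(b ≤ j ∧ (x :: t)[j - b]? = some x) from
                fun hcc => absurd hcc.1 (by omega)),
            List.getElem?_set, if_neg (show ¬(b = j) from by omega)]
        · -- j = b: written here, frame for the recursive call
          subst hj
          rw [if_neg (show ¬(j + 1 ≤ j ∧ t[j - (j + 1)]? = some x) from
                fun hcc => absurd hcc.1 (by omega)),
            List.getElem?_set, if_pos (rfl : j = j),
            if_pos (show j ≤ j ∧ (x :: t)[j - j]? = some x from
              ⟨Nat.le_refl _, by simp⟩)]
          by_cases hl : j < out.length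
          · rw [if_pos hl, if_pos hl]
            simp
          · rw [if_neg hl, if_neg hl]
        · -- j > b: handled by the recursive call, with the count shifted by the head
          have h1 : j - b = (j - (b + 1)) + 1 := by omega
          have hidx : (x :: t)[j - b]? = t[j - (b + 1)]? := by
            rw [h1, List.getElem?_cons_succ]
          by_cases hc : t[j - (b + 1)]? = some x
          · rw [if_pos (show b + 1 ≤ j ∧ t[j - (b + 1)]? = some x from ⟨by omega, hc⟩),
              if_pos (show b ≤ j ∧ (x :: t)[j - b]? = some x from
                ⟨by omega, hidx.trans hc⟩)]
            have h2 : (x :: t).take (j - b) = x :: t.take (j - (b + 1)) := by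
              rw [h1]; simp
            rw [h2, List.count_cons_self]
            have harith : ((k0 + 1 : Nat) : Int) + ((t.take (j - (b + 1))).count x : Int)
                = (k0 : Int) + (((t.take (j - (b + 1))).count x + 1 : Nat) : Int) := by
              push_cast; ring
            rw [harith]
          · rw [if_neg (show ¬(b + 1 ≤ j ∧ t[j - (b + 1)]? = some x) from
                  fun hcc => hc hcc.2),
              if_neg (show ¬(b ≤ j ∧ (x :: t)[j - b]? = some x) from
                  fun hcc => hc (hidx.symm.trans hcc.2)),
              List.getElem?_set, if_neg (show ¬(b = j) from by omega)]
      · rw [if_neg hx, ih (b + 1) k0 out j]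
        rcases lt_trichotomy j b with hj | hj | hj
        · rw [if_neg (show ¬(b + 1 ≤ j ∧ t[j - (b + 1)]? = some c) from
                fun hcc => absurd hcc.1 (by omega)),
            if_neg (show ¬(b ≤ j ∧ (x :: t)[j - b]? = some c) from
                fun hcc => absurd hcc.1 (by omega))]
        · subst hj
          rw [if_neg (show ¬(j + 1 ≤ j ∧ t[j - (j + 1)]? = some c) from
                fun hcc => absurd hcc.1 (by omega)),
            if_neg (show ¬(j ≤ j ∧ (x :: t)[j - j]? = some c) from by
              rintro ⟨-, h⟩
              rw [Nat.sub_self, List.getElem?_cons_zero] at h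
              exact hx (Option.some_inj.mp h))]
        · have h1 : j - b = (j - (b + 1)) + 1 := by omega
          have hidx : (x :: t)[j - b]? = t[j - (b + 1)]? := by
            rw [h1, List.getElem?_cons_succ]
          by_cases hc : t[j - (b + 1)]? = some c
          · rw [if_pos (show b + 1 ≤ j ∧ t[j - (b + 1)]? = some c from ⟨by omega, hc⟩),
              if_pos (show b ≤ j ∧ (x :: t)[j - b]? = some c from
                ⟨by omega, hidx.trans hc⟩)]
            have h2 : (x :: t).take (j - b) = x :: t.take (j - (b + 1)) := by
              rw [h1]; simp
            rw [h2, List.count_cons_of_ne hx]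
          · rw [if_neg (show ¬(b + 1 ≤ j ∧ t[j - (b + 1)]? = some c) from
                  fun hcc => hc hcc.2),
              if_neg (show ¬(b ≤ j ∧ (x :: t)[j - b]? = some c) from
                  fun hcc => hc (hidx.symm.trans hcc.2))]

-- phase 2, all items: length is preserved
theorem pvOuter_length (ps : List (String × List Int)) : ∀ (out : List String),
    (ps.foldl (fun out kv => pvWrite kv.1 kv.2 0 out) out).length = out.length := by
  induction ps with
  | nil => intro out; rfl
  | cons p ps' ih => intro out; rw [List.foldl_cons, ih, pvWrite_length]

-- phase 2, all items: a position whose letter's item is present ends up with its label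
theorem pvOuter_get (letters : List Char) (ps : List (String × List Int)) :
    ∀ (out : List String),
    (∀ p ∈ ps, ∃ c : Char, p = (String.ofList [c], pvOccs c letters 0)) →
    out.length = letters.length →
    ∀ (j : Nat) (c : Char), letters[j]? = some c →
    (ps.foldl (fun out kv => pvWrite kv.1 kv.2 0 out) out)[j]? =
      if String.ofList [c] ∈ ps.map (fun x => x.1)
      then some (String.ofList [c] ++ pvSfx (((letters.take j).count c : Int)))
      else out[j]? := by
  induction ps with
  | nil => intro out _ _ j c _; simp
  | cons p ps' ih =>
      intro out hshape hlen j c hj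
      obtain ⟨c', rfl⟩ := hshape p List.mem_cons_self
      have hjlt : j < letters.length := by
        have := List.getElem?_eq_some_iff.mp hj
        exact this.1
      rw [List.foldl_cons]
      have hout1 : (pvWrite (String.ofList [c']) (pvOccs c' letters 0) 0 out).length
          = letters.length := by rw [pvWrite_length]; exact hlen
      rw [ih _ (fun p hp => hshape p (List.mem_cons_of_mem _ hp)) hout1 j c hj]
      have hwrite := pvInner_get c' letters 0 0 out j
      simp only [Nat.cast_zero] at hwrite
      by_cases htail : String.ofList [c] ∈ ps'.map (fun x => x.1)
      · rw [if_pos htail, if_pos (by simp [htail])]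
      · rw [if_neg htail]
        by_cases hc : c' = c
        · subst hc
          rw [if_pos (by simp)]
          rw [hwrite, if_pos ⟨Nat.zero_le _, by simpa using hj⟩, if_pos (hlen ▸ hjlt)]
          simp
        · have hne : String.ofList [c] ≠ String.ofList [c'] := fun h => hc (pvSingle_inj h).symm
          rw [if_neg (by simp [htail, hne])]
          rw [hwrite, if_neg (by
            rintro ⟨-, h⟩
            rw [Nat.sub_zero, hj] at h
            exact hc (Option.some_inj.mp h).symm)]

-- phase 1: the dict's stored list under key c is exactly c's positions
theorem pvIdx_getD (letters : List Char) (c : Char) :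
    ((PySem.List.enumerate (letters.map (fun c => String.ofList [c])) 0).foldl
        (fun d pl => d.modify pl.2 [] (· ++ [pl.1])) PySem.Dict.empty).getD
      (String.ofList [c]) [] = pvOccs c letters 0 := by
  have key := PySem.Dict.getD_foldl_modify_append
    ((PySem.List.enumerate (letters.map (fun c => String.ofList [c])) 0).map Prod.swap)
    (PySem.Dict.empty : PySem.Dict String (List Int)) (String.ofList [c])
  simp only [List.foldl_map, Prod.fst_swap, Prod.snd_swap, PySem.Dict.getD_empty,
    List.nil_append] at key
  rw [key]
  simpa using pvFilt c letters 0

-- phase 1: the dict's keys are the distinct letters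
theorem pvIdx_keys (letters : List Char) :
    ((PySem.List.enumerate (letters.map (fun c => String.ofList [c])) 0).foldl
        (fun d pl => d.modify pl.2 [] (· ++ [pl.1])) PySem.Dict.empty).keys
      = PySem.Set.ofList (letters.map (fun c => String.ofList [c])) := by
  have key := PySem.Dict.keys_foldl_modify_key
    (PySem.List.enumerate (letters.map (fun c => String.ofList [c])) 0)
    (fun pl => pl.2) [] (fun _ pl => (· ++ [pl.1]))
    (PySem.Dict.empty : PySem.Dict String (List Int))
  exact key.trans (by
    rw [PySem.Dict.keys_empty, PySem.Set.update_nil_left, PySem.List.map_snd_enumerate])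

theorem pvIdx_nodup (letters : List Char) :
    ((PySem.List.enumerate (letters.map (fun c => String.ofList [c])) 0).foldl
        (fun d pl => d.modify pl.2 [] (· ++ [pl.1])) PySem.Dict.empty).keys.Nodup := by
  have key := PySem.Dict.nodup_keys_foldl_modify_key
    (PySem.List.enumerate (letters.map (fun c => String.ofList [c])) 0)
    (fun pl => pl.2) [] (fun _ pl => (· ++ [pl.1]))
    (PySem.Dict.empty : PySem.Dict String (List Int)) PySem.Dict.nodup_keys_empty
  exact key

-- A's fold maintains: dict = counts of the seen prefix p, list = done ++ untouched tail
theorem pvA_loop (r : List Char) : ∀ (p : List Char) (done : List String)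
    (d : PySem.Dict String Int),
    done.length = p.length →
    (∀ c : Char, d.contains (String.ofList [c]) = decide (p.count c ≠ 0)) →
    (∀ c : Char, d.getD (String.ofList [c]) 0 = (p.count c : Int)) →
    ((PySem.List.enumerate (r.map (fun c => String.ofList [c])) (p.length : Int)).foldl
      (fun (st : List String × PySem.Dict String Int) pl =>
        let pos := pl.1
        let letter := pl.2
        let suffix : String :=
          match st.2.get? letter with
          | none => ""
          | some n => PySem.Int.toStr n
        let letters := st.1.set pos.toNat (letter ++ suffix)
        let d := if st.2.contains letter = false
                 then st.2.insert letter 1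
                 else st.2.modify letter 0 (· + 1)
        (letters, d))
      (done ++ r.map (fun c => String.ofList [c]), d)).1
      = done ++ pvSuffixOut p r := by
  induction r with
  | nil => intro p done d _ _ _; simp [pvSuffixOut]
  | cons c r' ih =>
      intro p done d hlen hcont hval
      rw [List.map_cons, PySem.List.enumerate_cons, List.foldl_cons]
      have hkey : ∀ c' : Char, (String.ofList [c'] = String.ofList [c]) ↔ c' = c :=
        fun c' => ⟨pvSingle_inj, by rintro rfl; rfl⟩
      have hcnt : ∀ c' : Char, (p ++ [c]).count c' = p.count c' + (if c' = c then 1 else 0) := by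
        intro c'
        rcases eq_or_ne c' c with h | h
        · subst h; simp [List.count_append]
        · simp [List.count_append, h, Ne.symm h]
      have htoNat : ((p.length : Int)).toNat = done.length := by simp [hlen]
      have hget : d.get? (String.ofList [c]) =
          if p.count c = 0 then none else some ((p.count c : Int)) := by
        by_cases h0 : p.count c = 0
        · rw [if_pos h0, (PySem.Dict.get?_eq_none_iff_contains d _)]
          rw [hcont c]; simp [h0]
        · have hc : d.contains (String.ofList [c]) = true := by rw [hcont c]; simp [h0]
          rw [PySem.Dict.contains_eq_isSome_get?] at hc
          obtain ⟨v, hv⟩ := Option.isSome_iff_exists.mp hc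
          have := hval c
          rw [PySem.Dict.getD_eq_get?_getD, hv] at this
          simp at this
          rw [if_neg h0, hv, this]
      by_cases h0 : p.count c = 0
      · -- first occurrence: suffix "", dict gains the key with value 1
        have hcontc : d.contains (String.ofList [c]) = false := by rw [hcont c]; simp [h0]
        rw [show ((p.length : Int) + 1) = (((p ++ [c]).length : Int)) by
          push_cast [List.length_append]; norm_num]
        have := ih (p ++ [c]) (done ++ [String.ofList [c] ++ ""])
          (d.insert (String.ofList [c]) 1)
          (by simp [hlen])
          (by intro c'
              rw [PySem.Dict.contains_insert, hcnt c']
              rcases eq_or_ne c' c with h | h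
              · rw [h]; simp
              · simp [beq_iff_eq, hkey, h, hcont c'])
          (by intro c'
              rw [PySem.Dict.getD_insert, hcnt c']
              rcases eq_or_ne c' c with h | h
              · rw [h]; simp [h0]
              · simp [hkey, h, hval c'])
        rw [pvSuffixOut]
        simp only [hget, hcontc, htoNat, pvSetAppend, h0]
        simp only at this ⊢
        simpa [h0, pvSfx] using this
      · -- repeat occurrence: suffix is the running count, dict value bumped
        have hcontc : d.contains (String.ofList [c]) = true := by rw [hcont c]; simp [h0]
        rw [show ((p.length : Int) + 1) = (((p ++ [c]).length : Int)) by
          push_cast [List.length_append]; norm_num]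
        have := ih (p ++ [c])
          (done ++ [String.ofList [c] ++ PySem.Int.toStr ((p.count c : Int))])
          (d.modify (String.ofList [c]) 0 (· + 1))
          (by simp [hlen])
          (by intro c'
              rw [PySem.Dict.contains_modify, hcnt c']
              rcases eq_or_ne c' c with h | h
              · rw [h]; simp
              · simp [beq_iff_eq, hkey, h, hcont c'])
          (by intro c'
              rw [PySem.Dict.getD_modify, hcnt c']
              rcases eq_or_ne c' c with h | h
              · rw [h]; simp [hval c]
              · simp [hkey, h, hval c'])
        rw [pvSuffixOut]
        simp only [hget, if_neg h0, hcontc, htoNat, pvSetAppend]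
        simp only [List.append_cons done
          (String.ofList [c] ++ PySem.Int.toStr ((p.count c : Int))) (r'.map _)] at this ⊢
        simpa [h0, pvSfx] using this

-- ===== VERDICT (by name: the statement is the Claim_ definition above) =====
theorem mark_repetitions_spec : Claim_equal_mark_repetitions := by
  intro word _
  unfold Spec_mark_repetitions mark_repetitions mark_repetitions_alt
  have hA := pvA_loop word.toList [] [] PySem.Dict.empty (by simp)
    (by intro c; simp)
    (by intro c; simp)
  simp only [List.nil_append, List.length_nil, Nat.cast_zero] at hA
  rw [hA]
  -- B side: name the index and rewrite its items
  set letters := word.toList with hlet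
  set LS := letters.map (fun c => String.ofList [c]) with hLS
  set idx := (PySem.List.enumerate LS 0).foldl
      (fun d pl => d.modify pl.2 [] (· ++ [pl.1])) PySem.Dict.empty with hidx
  have hitems : idx.items = idx.keys.map (fun k => (k, idx.getD k [])) :=
    PySem.Dict.items_eq_map_keys idx (pvIdx_nodup letters) []
  have hkeys : idx.keys = PySem.Set.ofList LS := pvIdx_keys letters
  -- the port's outer fold IS pvWrite item by item
  have hfold : (fun (out : List String) (kv : String × List Int) =>
      (PySem.List.enumerate kv.2 0).foldl
        (fun out rp => PySem.List.pySetD out rp.2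
          (kv.1 ++ (if rp.1 = 0 then "" else PySem.Int.toStr rp.1))) out)
      = (fun out kv => pvWrite kv.1 kv.2 0 out) := rfl
  rw [hfold]
  have hshape : ∀ p ∈ idx.items, ∃ c : Char, p = (String.ofList [c], pvOccs c letters 0) := by
    intro p hp
    rw [hitems] at hp
    obtain ⟨k, hk, rfl⟩ := List.mem_map.mp hp
    rw [hkeys] at hk
    have hk' : k ∈ LS := (PySem.Set.mem_ofList _ _).mp hk
    obtain ⟨c, _, rfl⟩ := List.mem_map.mp hk'
    exact ⟨c, by rw [pvIdx_getD letters c]⟩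
  have hlen0 : (List.replicate LS.length ("" : String)).length = letters.length := by
    simp [hLS]
  apply List.ext_getElem?
  intro j
  by_cases hj : j < letters.length
  · have hjc : letters[j]? = some letters[j] := List.getElem?_eq_getElem hj
    rw [pvOuter_get letters idx.items _ hshape hlen0 j letters[j] hjc]
    have hmem : String.ofList [letters[j]] ∈ idx.items.map (fun x => x.1) := by
      rw [hitems, List.map_map]
      have : String.ofList [letters[j]] ∈ idx.keys := by
        rw [hkeys]
        exact (PySem.Set.mem_ofList _ _).mpr (List.mem_map.mpr ⟨letters[j], List.getElem_mem hj, rfl⟩)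
      simpa using this
    rw [if_pos hmem]
    rw [pvSuffixOut_getElem? letters [] j letters[j] hjc]
    simp
  · rw [List.getElem?_eq_none (by
        rw [pvSuffixOut_length]; omega),
      List.getElem?_eq_none (by
        rw [pvOuter_length, hlen0]; omega)]
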